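-- pv_equiv track=rewrite | github.com/Ganddalf/pocketlibrary | book.py | changed_price
-- ===== SOURCE A (Python) =====
-- def changed_price(price):
--     price = list(str(price))
--     i = 0
--     temp_price = ""
--     for char in list(reversed(price)):
--         temp_price += char
--         i += 1
--         if i % 3 == 0:
--             temp_price += ' '
--     price = ''.join(list(reversed(temp_price))) + " руб."
--     return price
-- ===== SOURCE B (Python) =====
-- def _chunks(t):
--     if not t:
--         return ""
--     chunk = t[:3]
--     return chunk + (' ' if len(chunk) == 3 else '') + _chunks(t[3:])
--
-- def changed_price(price):
--     t = str(price)[::-1]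
--     buf = _chunks(t)
--     return buf[::-1] + " руб."
-- ===== Notes on version B (the rewrite author's own statement) =====
-- stated objective: simpler
-- what changed: Replaces A's char-by-char loop with a modulo-3 counter and double string reversal bookkeeping by a direct recursive chunking of the reversed digit string into groups of three, appending a space exactly after each full group.
import Mathlib
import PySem

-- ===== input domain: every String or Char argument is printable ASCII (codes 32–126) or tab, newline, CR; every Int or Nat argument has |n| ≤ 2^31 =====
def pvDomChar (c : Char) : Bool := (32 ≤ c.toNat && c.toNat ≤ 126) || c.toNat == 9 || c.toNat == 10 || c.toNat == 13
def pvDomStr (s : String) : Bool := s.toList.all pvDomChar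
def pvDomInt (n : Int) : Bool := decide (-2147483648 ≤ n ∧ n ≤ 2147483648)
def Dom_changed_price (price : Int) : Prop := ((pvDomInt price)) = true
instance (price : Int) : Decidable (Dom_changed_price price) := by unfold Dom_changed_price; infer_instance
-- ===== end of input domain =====

-- B re-implements the formatting by recursive 3-character chunking of the reversed digits
-- instead of A's char-by-char loop with a modulo counter; same output, objective: simpler.

-- ===== PORT A =====
-- temp_price is accumulated as a List Char (Python string concatenation), counter i as Int.
def changed_price (price : Int) : String :=
  let priceL : List Char := PySem.Int.toChars price
  let st := priceL.reverse.foldl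
      (fun (st : List Char × Int) char =>
        let temp := st.1 ++ [char]
        let i := st.2 + 1
        if i % 3 == 0 then (temp ++ [' '], i) else (temp, i))
      ([], 0)
  String.ofList st.1.reverse ++ " руб."

-- ===== PORT B =====
-- _chunks: t[:3] / t[3:] ported as take 3 / drop 3 (nonnegative slice bounds).
def pvChunks (t : List Char) : List Char :=
  match t with
  | [] => []
  | a :: rest =>
    let chunk := (a :: rest).take 3
    chunk ++ (if chunk.length == 3 then [' '] else []) ++ pvChunks ((a :: rest).drop 3)
termination_by t.length
decreasing_by simp

def changed_price_alt (price : Int) : String :=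
  let t : List Char := (PySem.Int.toChars price).reverse
  let buf := pvChunks t
  String.ofList buf.reverse ++ " руб."

-- ===== PRECONDITION & SPEC =====
def Spec_changed_price (price : Int) (out : String) : Prop := out = changed_price_alt price
instance (price : Int) (out : String) : Decidable (Spec_changed_price price out) := by unfold Spec_changed_price; infer_instance

-- ===== CLAIM (what is proved, stated in full; the proofs are below) =====
def Claim_equal_changed_price : Prop := ∀ (price : Int), Dom_changed_price price → Spec_changed_price price (changed_price price)

-- ===== LEMMAS AND PROOFS =====

-- A's counter-driven fold, started at any counter i ≡ 0 (mod 3), produces exactly the chunked string.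
theorem pv_fold_eq_chunks (t : List Char) (acc : List Char) (i : Int) (hi : i % 3 = 0) :
    (t.foldl
      (fun (st : List Char × Int) char =>
        let temp := st.1 ++ [char]
        let i := st.2 + 1
        if i % 3 == 0 then (temp ++ [' '], i) else (temp, i))
      (acc, i)).1 = acc ++ pvChunks t := by
  match t with
  | [] => simp [pvChunks]
  | [a] =>
    have h1 : ¬ ((i + 1) % 3 == 0) := by simp; omega
    simp [pvChunks, List.foldl, h1]
  | [a, b] =>
    have h1 : ¬ ((i + 1) % 3 == 0) := by simp; omega
    have h2 : ¬ ((i + 1 + 1) % 3 == 0) := by simp; omega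
    simp [pvChunks, List.foldl, h1, h2]
  | a :: b :: c :: r =>
    have h1 : ¬ ((i + 1) % 3 == 0) := by simp; omega
    have h2 : ¬ ((i + 1 + 1) % 3 == 0) := by simp; omega
    have h3 : ((i + 1 + 1 + 1) % 3 == 0) := by simp; omega
    simp only [List.foldl, h1, h2, h3, if_neg, if_pos, Bool.false_eq_true,
      not_false_eq_true]
    rw [pv_fold_eq_chunks r (acc ++ [a] ++ [b] ++ [c] ++ [' ']) (i + 1 + 1 + 1) (by omega)]
    simp [pvChunks]
termination_by t.length

-- ===== VERDICT (by name: the statement is the Claim_ definition above) =====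
theorem changed_price_spec : Claim_equal_changed_price := by
  intro price _
  unfold Spec_changed_price changed_price changed_price_alt
  simp only
  rw [pv_fold_eq_chunks _ [] 0 (by decide)]
  simp
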